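-- pv_equiv track=rewrite | github.com/apoleon33/iya | database.py | findAge
-- ===== SOURCE A (Python) =====
-- def findAge(value: int) -> str:
--     '''
--     convert the value found in the database into one of the 5 existing equivalent
--     '''
--     age = {
--         1: ["Child", 0],
--         3: ["Teen", 0],
--         4: ["Adult", 0],
--         5: ["Senior", 0],
--         6: ["Ageless", 0]
--     }
--
--     for i in age.keys():
--         age[i][1] = abs(value - i)
--     mini = 1
--     for y in age.keys():
--         if age[y][1] < age[mini][1]:
--             mini = y
--     return age[mini][0]
-- ===== SOURCE B (Python) =====
-- def findAge(value: int) -> str: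
--     # threshold cascade over the fixed keys; simpler than A's dict + two loops
--     if value <= 2:
--         return "Child"
--     if value <= 3:
--         return "Teen"
--     if value <= 4:
--         return "Adult"
--     if value <= 5:
--         return "Senior"
--     return "Ageless"
-- ===== Notes on version B (the rewrite author's own statement) =====
-- stated objective: simpler
-- what changed: Replaced the dict of distances and two loops (fill abs distances, then scan for the minimum key) by a direct threshold cascade on value using the midpoints between the fixed keys.
import Mathlib
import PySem

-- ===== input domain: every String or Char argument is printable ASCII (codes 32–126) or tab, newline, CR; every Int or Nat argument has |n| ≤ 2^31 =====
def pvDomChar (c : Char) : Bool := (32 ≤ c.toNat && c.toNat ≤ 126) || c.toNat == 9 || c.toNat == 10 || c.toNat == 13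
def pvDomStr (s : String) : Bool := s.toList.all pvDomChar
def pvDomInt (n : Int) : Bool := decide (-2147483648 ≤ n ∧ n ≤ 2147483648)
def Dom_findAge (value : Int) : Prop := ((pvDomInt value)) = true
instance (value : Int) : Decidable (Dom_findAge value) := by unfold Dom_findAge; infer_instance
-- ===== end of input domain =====

-- B replaces A's distance dict + two loops by a direct threshold cascade (objective: simpler).

-- ===== PORT A =====
def findAge (value : Int) : String :=
  let age : PySem.Dict Int (String × Int) := PySem.Dict.ofList
    [(1, ("Child", 0)), (3, ("Teen", 0)), (4, ("Adult", 0)), (5, ("Senior", 0)), (6, ("Ageless", 0))]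
  -- for i in age.keys(): age[i][1] = abs(value - i)
  let age := (PySem.Dict.keys age).foldl
    (fun d i => PySem.Dict.modify d i ("", 0) (fun p => (p.1, ((value - i).natAbs : Int)))) age
  -- mini = 1; for y in age.keys(): if age[y][1] < age[mini][1]: mini = y
  let mini := (PySem.Dict.keys age).foldl
    (fun mini y =>
      if (PySem.Dict.getD age y ("", 0)).2 < (PySem.Dict.getD age mini ("", 0)).2 then y else mini) 1
  (PySem.Dict.getD age mini ("", 0)).1

-- ===== PORT B =====
def findAge_alt (value : Int) : String :=
  if value ≤ 2 then "Child"
  else if value ≤ 3 then "Teen"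
  else if value ≤ 4 then "Adult"
  else if value ≤ 5 then "Senior"
  else "Ageless"

-- ===== PRECONDITION & SPEC =====
def Spec_findAge (value : Int) (out : String) : Prop := out = findAge_alt value
instance (value : Int) (out : String) : Decidable (Spec_findAge value out) := by unfold Spec_findAge; infer_instance

-- ===== CLAIM (what is proved, stated in full; the proofs are below) =====
def Claim_equal_findAge : Prop := ∀ (value : Int), Dom_findAge value → Spec_findAge value (findAge value)

-- ===== LEMMAS AND PROOFS =====
-- the literal dict's key list
theorem pv_keys_lit :
    (PySem.Dict.keys (PySem.Dict.ofList
      ([(1, ("Child", 0)), (3, ("Teen", 0)), (4, ("Adult", 0)), (5, ("Senior", 0)),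
        (6, ("Ageless", 0))] : List (Int × (String × Int))))) = [1, 3, 4, 5, 6] := rfl

-- the dict after A's first loop, evaluated
theorem pv_dist_dict (v : Int) :
    (([1, 3, 4, 5, 6] : List Int).foldl
      (fun d i => PySem.Dict.modify d i ("", 0) (fun p => (p.1, ((v - i).natAbs : Int))))
      (PySem.Dict.ofList
        ([(1, ("Child", 0)), (3, ("Teen", 0)), (4, ("Adult", 0)), (5, ("Senior", 0)),
          (6, ("Ageless", 0))] : List (Int × (String × Int)))))
    = PySem.Dict.mk [(1, ("Child", ((v - 1).natAbs : Int))), (3, ("Teen", (v - 3).natAbs)),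
        (4, ("Adult", (v - 4).natAbs)), (5, ("Senior", (v - 5).natAbs)),
        (6, ("Ageless", (v - 6).natAbs))] := rfl

set_option maxHeartbeats 4000000 in
theorem pv_main (v : Int) : findAge v = findAge_alt v := by
  unfold findAge findAge_alt
  simp only [pv_keys_lit, pv_dist_dict v, PySem.Dict.keys_mk, List.map_cons, List.map_nil,
    List.foldl_cons, List.foldl_nil]
  split_ifs <;>
    simp only [PySem.Dict.getD, PySem.Dict.get?_mk_cons, Int.reduceBEq,
      Bool.false_eq_true, if_false, if_true, Option.getD_some] at * <;>
    first | rfl | (exfalso; omega)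

-- ===== VERDICT (by name: the statement is the Claim_ definition above) =====
theorem findAge_spec : Claim_equal_findAge := by
  intro value _
  unfold Spec_findAge
  exact pv_main value
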